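-- pv_equiv track=rewrite | github.com/kaelynj/Qiskit-HubbardModel | src/ClassicalHubbardEvolutionChain.py | get_mapping
-- ===== SOURCE A (Python) =====
-- def get_mapping(states):
--     num_sites = len(states[0][0])
--     mode_list = []
--     for i in range(0,2*num_sites):
--         index_list = []
--         for state_index in range(0,len(states)):
--             state = states[state_index]
--         #Check spin-up modes
--             if i < num_sites:
--                 if state[0][i]==1:
--                     index_list.append(state_index)
--         #Check spin-down modes
--             else:
--                 if state[1][i-num_sites]==1:
--                     index_list.append(state_index)
--         if index_list:
--             mode_list.append(index_list)
--     return mode_list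
-- ===== SOURCE B (Python) =====
-- def get_mapping(states):
--     num_sites = len(states[0][0])
--     # one pass over the states: flat (mode, state_index) occurrence list
--     pairs = []
--     for state_index, state in enumerate(states):
--         for i in range(num_sites):
--             if state[0][i] == 1:
--                 pairs.append((i, state_index))
--         for i in range(num_sites):
--             if state[1][i] == 1:
--                 pairs.append((num_sites + i, state_index))
--     # group occurrences by mode
--     buckets = {}
--     for mode, idx in pairs:
--         buckets[mode] = buckets.get(mode, []) + [idx]
--     # emit non-empty buckets in mode order
--     return [buckets[m] for m in range(2 * num_sites) if m in buckets]
-- ===== Notes on version B (the rewrite author's own statement) =====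
-- stated objective: alternative
-- what changed: Instead of scanning all states once per mode (2*num_sites passes, skipping empty modes), B makes one pass over the states emitting a flat (mode, state_index) occurrence list, groups it by mode with a dict, and emits the non-empty buckets in mode order.
import Mathlib
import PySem

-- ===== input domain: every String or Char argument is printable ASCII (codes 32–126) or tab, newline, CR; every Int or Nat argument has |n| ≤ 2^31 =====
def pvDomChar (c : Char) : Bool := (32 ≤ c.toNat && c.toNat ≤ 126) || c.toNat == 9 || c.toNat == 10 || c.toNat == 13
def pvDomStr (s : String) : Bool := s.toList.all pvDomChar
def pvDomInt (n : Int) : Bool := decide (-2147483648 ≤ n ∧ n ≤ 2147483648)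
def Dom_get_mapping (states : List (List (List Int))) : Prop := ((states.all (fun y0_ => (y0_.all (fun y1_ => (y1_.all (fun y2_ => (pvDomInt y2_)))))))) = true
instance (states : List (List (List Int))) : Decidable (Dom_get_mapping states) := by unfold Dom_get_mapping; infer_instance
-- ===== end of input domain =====

-- B replaces A's per-mode rescans of all states by one pass over the states that emits a flat
-- (mode, state_index) occurrence list, groups it through a dict, and emits the non-empty buckets
-- in mode order (objective: alternative).

-- ===== PORT A =====
def get_mapping (states : List (List (List Int))) : List (List Int) :=
  let num_sites : Int := PySem.List.len (PySem.List.pyGetD (PySem.List.pyGetD states 0 []) 0 [])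
  (PySem.List.pyRange 0 (2 * num_sites) 1).foldl (fun mode_list i =>
    let index_list :=
      (PySem.List.pyRange 0 (PySem.List.len states) 1).foldl (fun index_list state_index =>
        let state := PySem.List.pyGetD states state_index []
        if i < num_sites then
          if PySem.List.pyGetD (PySem.List.pyGetD state 0 []) i 0 == 1 then index_list ++ [state_index] else index_list
        else
          if PySem.List.pyGetD (PySem.List.pyGetD state 1 []) (i - num_sites) 0 == 1 then index_list ++ [state_index] else index_list) []
    if index_list ≠ [] then mode_list ++ [index_list] else mode_list) []

-- ===== PORT B =====
def get_mapping_alt (states : List (List (List Int))) : List (List Int) :=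
  let num_sites : Int := PySem.List.len (PySem.List.pyGetD (PySem.List.pyGetD states 0 []) 0 [])
  let pairs : List (Int × Int) :=
    (PySem.List.enumerate states 0).foldl (fun pairs p =>
      let pairs :=
        (PySem.List.pyRange 0 num_sites 1).foldl (fun pairs i =>
          if PySem.List.pyGetD (PySem.List.pyGetD p.2 0 []) i 0 == 1 then pairs ++ [(i, p.1)] else pairs) pairs
      (PySem.List.pyRange 0 num_sites 1).foldl (fun pairs i =>
        if PySem.List.pyGetD (PySem.List.pyGetD p.2 1 []) i 0 == 1 then pairs ++ [(num_sites + i, p.1)] else pairs) pairs) []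
  let buckets : PySem.Dict Int (List Int) :=
    pairs.foldl (fun d q => d.modify q.1 [] (· ++ [q.2])) PySem.Dict.empty
  (PySem.List.pyRange 0 (2 * num_sites) 1).foldl (fun acc m =>
    if buckets.contains m then acc ++ [buckets.getD m []] else acc) []

-- ===== PRECONDITION & SPEC =====
-- Pre_ = exactly the inputs A returns on: A raises IndexError when states or states[0] is empty,
-- or when num_sites > 0 and some state lacks two spin rows of length ≥ num_sites.
def Pre_get_mapping (states : List (List (List Int))) : Prop :=
  states ≠ [] ∧ states.getD 0 [] ≠ [] ∧
  (((states.getD 0 []).getD 0 []).length = 0 ∨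
    ∀ s ∈ states, 2 ≤ s.length ∧
      ((states.getD 0 []).getD 0 []).length ≤ (s.getD 0 []).length ∧
      ((states.getD 0 []).getD 0 []).length ≤ (s.getD 1 []).length)
instance (states : List (List (List Int))) : Decidable (Pre_get_mapping states) := by
  unfold Pre_get_mapping; infer_instance

def pvWitness_get_mapping : List (List (List Int)) := [[[1], [0]], [[1], [1]]]

def Spec_get_mapping (states : List (List (List Int))) (out : List (List Int)) : Prop := out = get_mapping_alt states
instance (states : List (List (List Int))) (out : List (List Int)) : Decidable (Spec_get_mapping states out) := by unfold Spec_get_mapping; infer_instance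

-- ===== CLAIM (what is proved, stated in full; the proofs are below) =====
def Claim_equal_get_mapping : Prop := ∀ (states : List (List (List Int))), Dom_get_mapping states → Pre_get_mapping states → Spec_get_mapping states (get_mapping states)

-- ===== LEMMAS AND PROOFS =====
def pvHasBit (n : Int) (s : List (List Int)) (k : Int) : Bool :=
  if k < n then PySem.List.pyGetD (PySem.List.pyGetD s 0 []) k 0 == 1
  else PySem.List.pyGetD (PySem.List.pyGetD s 1 []) (k - n) 0 == 1

theorem flatMap_if_eq_filter_map {α β : Type} (l : List α) (q : α → Bool) (f : α → β) :
    l.flatMap (fun x => if q x then [f x] else []) = (l.filter q).map f := by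
  induction l with
  | nil => rfl
  | cons x xs ih => by_cases h : q x <;> simp [List.flatMap_cons, h, ih]

theorem filter_beq_pyRange (a b k : Int) :
    (PySem.List.pyRange a b 1).filter (fun i => i == k) = if a ≤ k ∧ k < b then [k] else [] := by
  rw [show (fun i : Int => i == k) = (· == k) from rfl, List.filter_beq]
  by_cases h : a ≤ k ∧ k < b
  · rw [List.count_eq_one_of_mem (PySem.List.nodup_pyRange_one a b) (PySem.List.mem_pyRange_one.mpr h)]
    simp [h]
  · rw [List.count_eq_zero.mpr (fun hm => h (PySem.List.mem_pyRange_one.mp hm))]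
    simp [h]

-- the canonical per-mode column: indices of states whose mode-k bit is set
def pvCol (states : List (List (List Int))) (n k : Int) : List Int :=
  ((PySem.List.enumerate states 0).filter (fun p => pvHasBit n p.2 k)).map (·.1)

-- A's inner loop computes pvCol
theorem A_inner_eq_col (states : List (List (List Int))) (n k : Int) :
    (PySem.List.pyRange 0 (PySem.List.len states) 1).foldl (fun index_list state_index =>
        if k < n then
          if PySem.List.pyGetD (PySem.List.pyGetD (PySem.List.pyGetD states state_index []) 0 []) k 0 == 1 then index_list ++ [state_index] else index_list
        else
          if PySem.List.pyGetD (PySem.List.pyGetD (PySem.List.pyGetD states state_index []) 1 []) (k - n) 0 == 1 then index_list ++ [state_index] else index_list) []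
      = pvCol states n k := by
  refine (PySem.List.foldl_congr_mem _ _
      (fun il si => if pvHasBit n (PySem.List.pyGetD states si []) k then il ++ [si] else il) _
      (by intro acc x _; by_cases hk : k < n <;> simp [pvHasBit, hk])).trans ?_
  simp only [PySem.List.foldl_append_if]
  unfold pvCol
  rw [PySem.List.enumerate_eq_map_pyRange states ([] : List (List Int)), List.filter_map, List.map_map]
  simp [Function.comp_def]

-- B's per-state occurrence list for state p (index p.1, content p.2)
def pvMo (n : Int) (p : Int × List (List Int)) : List (Int × Int) :=
  ((PySem.List.pyRange 0 n 1).filter (fun i => PySem.List.pyGetD (PySem.List.pyGetD p.2 0 []) i 0 == 1)).map (fun i => (i, p.1))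
  ++ ((PySem.List.pyRange 0 n 1).filter (fun i => PySem.List.pyGetD (PySem.List.pyGetD p.2 1 []) i 0 == 1)).map (fun i => (n + i, p.1))

theorem mo_filter (n k : Int) (hk0 : 0 ≤ k) (hk2 : k < 2 * n) (p : Int × List (List Int)) :
    ((pvMo n p).filter (fun q => q.1 == k)).map (fun q => q.2)
      = if pvHasBit n p.2 k then [p.1] else [] := by
  unfold pvMo
  rw [List.filter_append, List.filter_map, List.filter_map, List.map_append, List.map_map, List.map_map]
  rw [show ((fun q : Int × Int => q.1 == k) ∘ fun i => (i, p.1)) = (fun i : Int => i == k) from rfl]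
  rw [show ((fun q : Int × Int => q.1 == k) ∘ fun i => (n + i, p.1)) = (fun i : Int => n + i == k) from rfl]
  rw [List.filter_congr (p := fun i : Int => n + i == k) (q := fun i : Int => i == k - n)
        (by intro x _
            by_cases h : n + x = k
            · have hx : x = k - n := by omega
              simp [hx]
            · have hx : x ≠ k - n := by omega
              simp [h, hx])]
  rw [List.filter_comm (fun i : Int => i == k), List.filter_comm (fun i : Int => i == k - n),
      filter_beq_pyRange, filter_beq_pyRange]
  by_cases hk : k < n
  · have h1 : (0 ≤ k ∧ k < n) := ⟨hk0, hk⟩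
    have h2 : ¬ (0 ≤ k - n ∧ k - n < n) := by omega
    rw [if_pos h1, if_neg h2]
    by_cases hb : PySem.List.pyGetD (PySem.List.pyGetD p.2 0 []) k 0 == 1 <;>
      simp [pvHasBit, hk, hb]
  · have h1 : ¬ (0 ≤ k ∧ k < n) := by omega
    have h2 : (0 ≤ k - n ∧ k - n < n) := by omega
    rw [if_neg h1, if_pos h2]
    by_cases hb : PySem.List.pyGetD (PySem.List.pyGetD p.2 1 []) (k - n) 0 == 1 <;>
      simp [pvHasBit, hk, hb]

theorem ports_agree (states : List (List (List Int))) :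
    get_mapping states = get_mapping_alt states := by
  unfold get_mapping get_mapping_alt
  simp only []
  generalize PySem.List.len (PySem.List.pyGetD (PySem.List.pyGetD states 0 []) 0 []) = n
  have hpairs : (PySem.List.enumerate states 0).foldl (fun pairs (p : Int × List (List Int)) =>
      (PySem.List.pyRange 0 n 1).foldl (fun pairs i =>
        if PySem.List.pyGetD (PySem.List.pyGetD p.2 1 []) i 0 == 1 then pairs ++ [(n + i, p.1)] else pairs)
        ((PySem.List.pyRange 0 n 1).foldl (fun pairs i =>
          if PySem.List.pyGetD (PySem.List.pyGetD p.2 0 []) i 0 == 1 then pairs ++ [(i, p.1)] else pairs) pairs)) []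
      = (PySem.List.enumerate states 0).flatMap (pvMo n) := by
    refine (PySem.List.foldl_congr_mem _ _ (fun acc p => acc ++ pvMo n p) _ ?_).trans
      (PySem.List.foldl_append_eq_flatMap _ _ _)
    intro acc p _
    simp only [PySem.List.foldl_append_if]
    rw [List.append_assoc]
    rfl
  rw [hpairs]
  refine PySem.List.foldl_congr_mem _ _ _ _ ?_
  intro acc k hk
  obtain ⟨hk0, hk2⟩ := PySem.List.mem_pyRange_one.mp hk
  have hfil : (((PySem.List.enumerate states 0).flatMap (pvMo n)).filter (fun q => q.1 == k)).map (fun q => q.2)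
      = pvCol states n k := by
    rw [List.filter_flatMap, List.map_flatMap]
    rw [show (fun p => (((pvMo n p).filter (fun q => q.1 == k)).map (fun q => q.2)))
        = (fun p : Int × List (List Int) => if pvHasBit n p.2 k then [p.1] else []) from
      funext (fun p => mo_filter n k hk0 hk2 p)]
    rw [flatMap_if_eq_filter_map]
    rfl
  have hgd : (((PySem.List.enumerate states 0).flatMap (pvMo n)).foldl
        (fun d q => d.modify q.1 [] (· ++ [q.2])) PySem.Dict.empty).getD k []
      = pvCol states n k := by
    rw [PySem.Dict.getD_foldl_modify_append, ← hfil]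
    simp
  have hct : (((PySem.List.enumerate states 0).flatMap (pvMo n)).foldl
        (fun d q => d.modify q.1 [] (· ++ [q.2])) PySem.Dict.empty).contains k = true
      ↔ pvCol states n k ≠ [] := by
    rw [PySem.Dict.contains_iff_mem_keys, PySem.Dict.keys_foldl_modify_key]
    rw [← hfil]
    simp [PySem.Dict.keys_empty, PySem.Set.update_nil_left, PySem.Set.mem_ofList,
      List.filter_eq_nil_iff]
  rw [A_inner_eq_col states n k, hgd]
  by_cases hc : pvCol states n k = []
  · have : ¬ ((((PySem.List.enumerate states 0).flatMap (pvMo n)).foldl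
        (fun d q => d.modify q.1 [] (· ++ [q.2])) PySem.Dict.empty).contains k = true) := by
      rw [hct]; simp [hc]
    simp [hc, this]
  · have : (((PySem.List.enumerate states 0).flatMap (pvMo n)).foldl
        (fun d q => d.modify q.1 [] (· ++ [q.2])) PySem.Dict.empty).contains k = true := hct.mpr hc
    simp [hc, this]

-- ===== VERDICT (by name: the statement is the Claim_ definition above) =====
theorem get_mapping_spec : Claim_equal_get_mapping := by
  intro states _ _
  exact ports_agree states
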